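-- pv_equiv track=rewrite | github.com/pypi-data/pypi-mirror-237 | packages/hak/hak-0.0.202.tar.gz/hak-0.0.202/hak/strings/block/add_pipes_to_subseq_lines.py | f
-- ===== SOURCE A (Python) =====
-- def f(x):
--   recurse = False
--   y = []
--   y.append(x[0])
--   for i in range(1, len(x)):
--     y_line = ''
--     for j in range(len(x[i])):
--       previous = x[i-1][j]
--       current = x[i][j]
--       if previous == '|' and current == ' ':
--         current = '|'
--         recurse = True
--       y_line += current
--     y.append(y_line)
--     if recurse: y = f(y)
--   return y
-- ===== SOURCE B (Python) =====
-- def f(x):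
--   # Single forward pass: each new line is filled from the ALREADY-FILLED previous
--   # result line, so the pipe-fill cascades in one sweep instead of A's re-recursion.
--   y = [x[0]]
--   for i in range(1, len(x)):
--     line = []
--     for j in range(len(x[i])):
--       c = x[i][j]
--       if y[i - 1][j] == '|' and c == ' ':
--         c = '|'
--       line.append(c)
--     y.append(''.join(line))
--   return y
-- ===== Notes on version B (the rewrite author's own statement) =====
-- stated objective: simpler
-- what changed: A re-runs itself recursively on the whole prefix after every line that changed; B is a single non-recursive forward pass that builds each line from the already-filled previous result line, reaching the same fixpoint in one sweep.
import Mathlib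
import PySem

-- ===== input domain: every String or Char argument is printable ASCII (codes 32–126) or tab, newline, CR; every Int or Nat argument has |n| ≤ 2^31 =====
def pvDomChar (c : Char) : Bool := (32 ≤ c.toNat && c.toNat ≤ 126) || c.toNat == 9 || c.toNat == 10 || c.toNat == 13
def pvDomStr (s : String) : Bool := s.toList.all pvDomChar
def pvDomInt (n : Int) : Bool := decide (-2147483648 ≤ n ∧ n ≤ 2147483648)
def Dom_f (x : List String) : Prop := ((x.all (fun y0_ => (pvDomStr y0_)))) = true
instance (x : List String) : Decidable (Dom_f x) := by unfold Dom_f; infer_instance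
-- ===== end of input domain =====

-- B replaces A's recursive prefix-refilling fixpoint by a single non-recursive forward
-- pass that fills each line from the already-filled previous result line (simpler).


-- ===== PORT A =====
-- A's inner j-loop over range(len(x[i])): threads the `recurse` flag and builds y_line.
-- The `.getD ' '` / `.getD []` defaults are only reached where Python raises IndexError (excluded by Pre_f).
def pvInnerA (prev cur : List Char) (recurse : Bool) : Bool × List Char :=
  (PySem.List.pyRange 0 (cur.length : Int)).foldl
    (fun st j =>
      let previous := (PySem.List.pyGet? prev j).getD ' '
      let current := (PySem.List.pyGet? cur j).getD ' '
      if previous = '|' ∧ current = ' ' then (true, st.2 ++ ['|'])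
      else (st.1, st.2 ++ [current]))
    (recurse, [])

-- total count of ' ' characters; used only to size the fuel of A's recursion
def pvSpaces (z : List (List Char)) : Nat := (z.map (fun l => l.count ' ')).sum

mutual
-- A's body; `fuel` is a totality guard only: every recursive call of A strictly decreases
-- the space count, so the fuel `f` passes (spaces + 1) never runs out where Python returns.
def pvFA (fuel : Nat) (x : List (List Char)) : List (List Char) :=
  match fuel with
  | 0 => x
  | fuel + 1 => pvFALoop fuel x 1 false [(PySem.List.pyGet? x 0).getD []]
termination_by (fuel, x.length + 1)
-- A's outer i-loop: `for i in range(1, len(x))` with state (recurse, y)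
def pvFALoop (fuel : Nat) (x : List (List Char)) (i : Nat) (recurse : Bool)
    (y : List (List Char)) : List (List Char) :=
  if _h : i < x.length then
    let prev := (PySem.List.pyGet? x ((i : Int) - 1)).getD []
    let cur := (PySem.List.pyGet? x (i : Int)).getD []
    let st := pvInnerA prev cur recurse
    let y2 := y ++ [st.2]
    let y3 := if st.1 then pvFA fuel y2 else y2
    pvFALoop fuel x (i + 1) st.1 y3
  else y
termination_by (fuel + 1, x.length - i)
end

def f (x : List String) : List String :=
  (pvFA (pvSpaces (x.map String.toList) + 1) (x.map String.toList)).map String.ofList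

-- ===== PORT B =====
-- B's inner j-loop: build the new line from x[i] and the previously produced line.
def pvFillB (prev cur : List Char) : List Char :=
  (PySem.List.pyRange 0 (cur.length : Int)).foldl
    (fun line j =>
      let c := (PySem.List.pyGet? cur j).getD ' '
      if (PySem.List.pyGet? prev j).getD ' ' = '|' ∧ c = ' ' then line ++ ['|']
      else line ++ [c])
    []

-- B's outer loop: each produced line is the `prev` (= y[i-1]) of the next one.
def pvFillRest (prev : List Char) (rest : List (List Char)) : List (List Char) :=
  match rest with
  | [] => []
  | c :: t => pvFillB prev c :: pvFillRest (pvFillB prev c) t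

def f_alt (x : List String) : List String :=
  match x.map String.toList with
  | [] => []
  | h :: t => (h :: pvFillRest h t).map String.ofList

-- ===== PRECONDITION & SPEC =====
-- Pre_f = exactly the inputs on which Python A returns: a nonempty list whose line lengths
-- never increase downward (otherwise x[i-1][j] raises IndexError, in A and in B alike).
def Pre_f (x : List String) : Prop :=
  x ≠ [] ∧ ∀ i, i < x.length → 1 ≤ i →
    PySem.Str.len (x.getD i "") ≤ PySem.Str.len (x.getD (i - 1) "")
instance (x : List String) : Decidable (Pre_f x) := by unfold Pre_f; infer_instance

def pvWitness_f : List String := ["ab | cd", "   |  ", " |  "]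

def Spec_f (x : List String) (out : List String) : Prop := out = f_alt x
instance (x : List String) (out : List String) : Decidable (Spec_f x out) := by unfold Spec_f; infer_instance

-- ===== CLAIM (what is proved, stated in full; the proofs are below) =====
def Claim_equal_f : Prop := ∀ (x : List String), Dom_f x → Pre_f x → Spec_f x (f x)

-- ===== LEMMAS AND PROOFS =====

-- clean structural versions of the one-step fill, the change flag and B's pass (proof-only)
def pvFillC : List Char → List Char → List Char
  | _, [] => []
  | [], c :: t => c :: pvFillC [] t
  | q :: ps, c :: t => (if q = '|' ∧ c = ' ' then '|' else c) :: pvFillC ps t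

def pvChgC : List Char → List Char → Bool
  | _, [] => false
  | [], _ :: t => pvChgC [] t
  | q :: ps, c :: t => (decide (q = '|' ∧ c = ' ')) || pvChgC ps t

def pvRestC (p : List Char) : List (List Char) → List (List Char)
  | [] => []
  | c :: t => pvFillC p c :: pvRestC (pvFillC p c) t

def pvFFC : List (List Char) → List (List Char)
  | [] => []
  | h :: t => h :: pvRestC h t

-- "every pipe of the first list is a pipe of the second" (same positions)
def pvPipeLe : List Char → List Char → Prop
  | [], _ => True
  | a :: as, [] => a ≠ '|' ∧ pvPipeLe as []
  | a :: as, b :: bs => (a = '|' → b = '|') ∧ pvPipeLe as bs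

-- the two inner-loop bodies, named so the fold lemmas below can talk about them
def pvABody (prev cur : List Char) : (Bool × List Char) → Int → (Bool × List Char) := fun st j =>
  if (PySem.List.pyGet? prev j).getD ' ' = '|' ∧ (PySem.List.pyGet? cur j).getD ' ' = ' '
  then (true, st.2 ++ ['|']) else (st.1, st.2 ++ [(PySem.List.pyGet? cur j).getD ' '])

def pvBBody (prev cur : List Char) : List Char → Int → List Char := fun line j =>
  if (PySem.List.pyGet? prev j).getD ' ' = '|' ∧ (PySem.List.pyGet? cur j).getD ' ' = ' '
  then line ++ ['|'] else line ++ [(PySem.List.pyGet? cur j).getD ' ']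

lemma tail_get (p : List Char) (k : Nat) : p[k + 1]? = p.tail[k]? := by
  cases p <;> simp

lemma abody_shift (prev c' : List Char) (c : Char) (st : Bool × List Char) (k : Nat) :
    pvABody prev (c :: c') st ((Nat.succ k : Nat) : Int) = pvABody prev.tail c' st ((k : Nat) : Int) := by
  unfold pvABody
  have h1 : ((Nat.succ k : Nat) : Int) = ((k + 1 : Nat) : Int) := by norm_num
  simp only [h1, PySem.List.pyGet?_natCast, tail_get, List.tail_cons]

lemma bbody_shift (prev c' : List Char) (c : Char) (line : List Char) (k : Nat) :
    pvBBody prev (c :: c') line ((Nat.succ k : Nat) : Int) = pvBBody prev.tail c' line ((k : Nat) : Int) := by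
  unfold pvBBody
  have h1 : ((Nat.succ k : Nat) : Int) = ((k + 1 : Nat) : Int) := by norm_num
  simp only [h1, PySem.List.pyGet?_natCast, tail_get, List.tail_cons]

lemma innerA_gen (cur : List Char) : ∀ (prev : List Char) (r : Bool) (acc : List Char),
    ((List.range cur.length).map (fun k : Nat => (k : Int))).foldl (pvABody prev cur) (r, acc)
    = (r || pvChgC prev cur, acc ++ pvFillC prev cur) := by
  induction cur with
  | nil => intro prev r acc; cases prev <;> simp [pvChgC, pvFillC]
  | cons c t ih =>
    intro prev r acc
    simp only [List.length_cons]
    rw [List.range_succ_eq_map, List.map_cons, List.foldl_cons, List.map_map, List.foldl_map]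
    simp only [Function.comp_apply]
    rw [PySem.List.foldl_congr_mem _ _ (fun st (k : Nat) => pvABody prev.tail t st (k : Int)) _
      (fun st k _ => abody_shift prev t c st k)]
    rw [← List.foldl_map (f := fun k : Nat => (k : Int)) (g := pvABody prev.tail t)]
    have h0p : (PySem.List.pyGet? prev ((0 : Nat) : Int)).getD ' ' = prev[0]?.getD ' ' := by
      rw [PySem.List.pyGet?_natCast]
    have h0c : (PySem.List.pyGet? (c :: t) ((0 : Nat) : Int)).getD ' ' = c := by
      rw [PySem.List.pyGet?_natCast]; rfl
    simp only [Nat.cast_zero] at h0p h0c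
    match prev with
    | [] =>
      simp only [Nat.cast_zero, pvABody, h0p, h0c]
      rw [if_neg (by simp), List.tail_nil, ih [] r (acc ++ [c])]
      simp [pvChgC, pvFillC]
    | b :: bs =>
      simp only [Nat.cast_zero, pvABody, h0p, h0c, List.getElem?_cons_zero, Option.getD_some,
        List.tail_cons]
      by_cases hP : b = '|' ∧ c = ' '
      · rw [if_pos hP, ih bs true (acc ++ ['|'])]
        simp [pvChgC, pvFillC, hP]
      · rw [if_neg hP, ih bs r (acc ++ [c])]
        simp [pvChgC, pvFillC, hP]

lemma fillB_gen (cur : List Char) : ∀ (prev : List Char) (acc : List Char),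
    ((List.range cur.length).map (fun k : Nat => (k : Int))).foldl (pvBBody prev cur) acc
    = acc ++ pvFillC prev cur := by
  induction cur with
  | nil => intro prev acc; cases prev <;> simp [pvFillC]
  | cons c t ih =>
    intro prev acc
    simp only [List.length_cons]
    rw [List.range_succ_eq_map, List.map_cons, List.foldl_cons, List.map_map, List.foldl_map]
    simp only [Function.comp_apply]
    rw [PySem.List.foldl_congr_mem _ _ (fun line (k : Nat) => pvBBody prev.tail t line (k : Int)) _
      (fun line k _ => bbody_shift prev t c line k)]
    rw [← List.foldl_map (f := fun k : Nat => (k : Int)) (g := pvBBody prev.tail t)]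
    have h0p : (PySem.List.pyGet? prev ((0 : Nat) : Int)).getD ' ' = prev[0]?.getD ' ' := by
      rw [PySem.List.pyGet?_natCast]
    have h0c : (PySem.List.pyGet? (c :: t) ((0 : Nat) : Int)).getD ' ' = c := by
      rw [PySem.List.pyGet?_natCast]; rfl
    simp only [Nat.cast_zero] at h0p h0c
    match prev with
    | [] =>
      simp only [Nat.cast_zero, pvBBody, h0p, h0c]
      rw [if_neg (by simp), List.tail_nil, ih [] (acc ++ [c])]
      simp [pvFillC]
    | b :: bs =>
      simp only [Nat.cast_zero, pvBBody, h0p, h0c, List.getElem?_cons_zero, Option.getD_some,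
        List.tail_cons]
      by_cases hP : b = '|' ∧ c = ' '
      · rw [if_pos hP, ih bs (acc ++ ['|'])]
        simp [pvFillC, hP]
      · rw [if_neg hP, ih bs (acc ++ [c])]
        simp [pvFillC, hP]

lemma innerA_eq (prev cur : List Char) (r : Bool) :
    pvInnerA prev cur r = (r || pvChgC prev cur, pvFillC prev cur) := by
  have h : pvInnerA prev cur r
      = (PySem.List.pyRange 0 (cur.length : Int)).foldl (pvABody prev cur) (r, []) := rfl
  rw [h, PySem.List.pyRange_zero_natCast, innerA_gen cur prev r []]
  simp

lemma fillB_eq (prev cur : List Char) : pvFillB prev cur = pvFillC prev cur := by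
  have h : pvFillB prev cur
      = (PySem.List.pyRange 0 (cur.length : Int)).foldl (pvBBody prev cur) [] := rfl
  rw [h, PySem.List.pyRange_zero_natCast, fillB_gen cur prev []]
  simp

lemma restEq (p : List Char) (t : List (List Char)) : pvFillRest p t = pvRestC p t := by
  induction t generalizing p with
  | nil => rfl
  | cons c t' ih => simp only [pvFillRest, pvRestC, fillB_eq, ih]

-- head-character facts about the one-position update
lemma step_of_pipe (q a : Char) (h : a = '|') : (if q = '|' ∧ a = ' ' then '|' else a) = '|' := by
  subst h; rw [if_neg]; rintro ⟨-, h2⟩; exact absurd h2 (by decide)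

lemma step_pipe_iff (q a : Char) :
    (if q = '|' ∧ a = ' ' then '|' else a) = '|' ↔ (a = '|' ∨ (q = '|' ∧ a = ' ')) := by
  by_cases hc : q = '|' ∧ a = ' '
  · rw [if_pos hc]; simp [hc]
  · rw [if_neg hc]
    constructor
    · exact fun h => Or.inl h
    · rintro (h | h)
      · exact h
      · exact absurd h hc

lemma fillC_nil (c : List Char) : pvFillC [] c = c := by
  induction c with
  | nil => rfl
  | cons a t ih => simp [pvFillC, ih]

lemma pipeLe_refl (p : List Char) : pvPipeLe p p := by
  induction p with
  | nil => trivial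
  | cons a t ih => exact ⟨fun h => h, ih⟩

lemma fillC_of_pipeLe_nil (q c : List Char) (h : pvPipeLe q []) : pvFillC q c = c := by
  induction c generalizing q with
  | nil => rfl
  | cons a t ih =>
    match q, h with
    | [], _ => simp [pvFillC, ih [] trivial]
    | b :: bs, ⟨h1, h2⟩ =>
      simp only [pvFillC, ih bs h2]
      rw [if_neg (fun hc => h1 hc.1)]

lemma pipeLe_fillC_self (p c : List Char) : pvPipeLe c (pvFillC p c) := by
  induction c generalizing p with
  | nil => trivial
  | cons a t ih =>
    match p with
    | [] => exact ⟨fun h => h, ih []⟩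
    | b :: bs => exact ⟨fun h => step_of_pipe b a h, ih bs⟩

lemma pipeLe_fillC_mono (c : List Char) : ∀ q p, pvPipeLe q p →
    pvPipeLe (pvFillC q c) (pvFillC p c) := by
  induction c with
  | nil => intro q p _; trivial
  | cons a t ih =>
    intro q p h
    match q, p, h with
    | [], p, _ => rw [fillC_nil]; exact pipeLe_fillC_self p (a :: t)
    | b :: bs, [], hh => rw [fillC_of_pipeLe_nil (b :: bs) (a :: t) hh, fillC_nil]; exact pipeLe_refl _
    | b :: bs, d :: ds, ⟨h1, h2⟩ =>
      refine ⟨?_, ih bs ds h2⟩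
      intro ha
      rcases (step_pipe_iff b a).1 ha with h | ⟨hb, ha'⟩
      · exact step_of_pipe d a h
      · rw [if_pos ⟨h1 hb, ha'⟩]

lemma fillC_absorb (c : List Char) : ∀ q p, pvPipeLe q p →
    pvFillC p (pvFillC q c) = pvFillC p c := by
  induction c with
  | nil => intro q p _; cases p <;> rfl
  | cons a t ih =>
    intro q p h
    match q, p, h with
    | [], p, _ => rw [fillC_nil]
    | b :: bs, [], hh => rw [fillC_of_pipeLe_nil (b :: bs) (a :: t) hh, fillC_nil]
    | b :: bs, d :: ds, ⟨h1, h2⟩ =>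
      simp only [pvFillC]
      rw [ih bs ds h2]
      congr 1
      by_cases hb : b = '|' ∧ a = ' '
      · rw [if_pos hb, step_of_pipe d '|' rfl, if_pos ⟨h1 hb.1, hb.2⟩]
      · rw [if_neg hb]

lemma restC_fix (t : List (List Char)) : ∀ q p, pvPipeLe q p →
    pvRestC p (pvRestC q t) = pvRestC p t := by
  induction t with
  | nil => intro q p _; rfl
  | cons c t' ih =>
    intro q p h
    simp only [pvRestC]
    rw [fillC_absorb c q p h, ih (pvFillC q c) (pvFillC p c) (pipeLe_fillC_mono c q p h)]

lemma ffc_idem (z : List (List Char)) : pvFFC (pvFFC z) = pvFFC z := by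
  cases z with
  | nil => rfl
  | cons h t => simp only [pvFFC]; rw [restC_fix t h h (pipeLe_refl h)]

lemma lastD_mono (t : List (List Char)) : ∀ p q, pvPipeLe p q →
    pvPipeLe (t.getLastD p) ((pvRestC q t).getLastD q) := by
  induction t with
  | nil => intro p q h; exact h
  | cons c t' ih =>
    intro p q h
    simp only [pvRestC, List.getLastD_cons]
    exact ih c (pvFillC q c) (pipeLe_fillC_self q c)

lemma restC_append (t : List (List Char)) : ∀ p c,
    pvRestC p (t ++ [c]) = pvRestC p t ++ [pvFillC ((pvRestC p t).getLastD p) c] := by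
  induction t with
  | nil => intro p c; rfl
  | cons a t' ih =>
    intro p c
    simp only [List.cons_append, pvRestC, List.getLastD_cons]
    rw [ih (pvFillC p a) c]

lemma ffc_append (z : List (List Char)) (c : List Char) (hz : z ≠ []) :
    pvFFC (z ++ [c]) = pvFFC z ++ [pvFillC ((pvFFC z).getLastD []) c] := by
  match z with
  | h :: t =>
    simp only [List.cons_append, pvFFC, List.getLastD_cons]
    rw [restC_append t h c]

lemma chgC_nil (c : List Char) : pvChgC [] c = false := by
  induction c with
  | nil => rfl
  | cons a t ih => simpa [pvChgC] using ih

lemma count_fillC_le (c : List Char) : ∀ p, (pvFillC p c).count ' ' ≤ c.count ' ' := by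
  induction c with
  | nil => intro p; cases p <;> simp [pvFillC]
  | cons a t ih =>
    intro p
    match p with
    | [] => rw [fillC_nil]
    | b :: bs =>
      simp only [pvFillC]
      have := ih bs
      by_cases hb : b = '|' ∧ a = ' '
      · rw [if_pos hb, hb.2]
        simp [List.count_cons]
        omega
      · rw [if_neg hb]
        simp [List.count_cons]
        omega

lemma count_fillC_lt (c : List Char) : ∀ p, pvChgC p c = true →
    (pvFillC p c).count ' ' < c.count ' ' := by
  induction c with
  | nil => intro p h; cases p <;> simp [pvChgC] at h
  | cons a t ih =>
    intro p h
    match p with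
    | [] =>
      rw [pvChgC, chgC_nil] at h
      exact absurd h (by simp)
    | b :: bs =>
      simp only [pvChgC, Bool.or_eq_true, decide_eq_true_eq] at h
      simp only [pvFillC]
      have hle := count_fillC_le t bs
      rcases h with ⟨hb, ha⟩ | h
      · rw [if_pos ⟨hb, ha⟩, ha]
        simp [List.count_cons]
        omega
      · have := ih bs h
        by_cases hb : b = '|' ∧ a = ' '
        · rw [if_pos hb, hb.2]
          simp [List.count_cons]
          omega
        · rw [if_neg hb]
          simp [List.count_cons]
          omega

lemma fillC_of_chg_false (c : List Char) : ∀ p, pvChgC p c = false → pvFillC p c = c := by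
  induction c with
  | nil => intro p _; cases p <;> rfl
  | cons a t ih =>
    intro p h
    match p with
    | [] => exact fillC_nil _
    | b :: bs =>
      simp only [pvChgC, Bool.or_eq_false_iff, decide_eq_false_iff_not] at h
      simp only [pvFillC, if_neg h.1, ih bs h.2]

lemma spaces_append (a : List (List Char)) (c : List Char) :
    pvSpaces (a ++ [c]) = pvSpaces a + c.count ' ' := by
  simp [pvSpaces]

lemma spaces_restC_le (t : List (List Char)) : ∀ p, pvSpaces (pvRestC p t) ≤ pvSpaces t := by
  induction t with
  | nil => intro p; rfl
  | cons c t' ih =>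
    intro p
    simp only [pvRestC, pvSpaces, List.map_cons, List.sum_cons]
    have h1 := count_fillC_le c p
    have h2 := ih (pvFillC p c)
    simp only [pvSpaces] at h2
    omega

lemma spaces_ffc_le (z : List (List Char)) : pvSpaces (pvFFC z) ≤ pvSpaces z := by
  cases z with
  | nil => rfl
  | cons h t =>
    simp only [pvFFC, pvSpaces, List.map_cons, List.sum_cons]
    have := spaces_restC_le t h
    simp only [pvSpaces] at this
    omega

lemma spaces_take_le (l : List (List Char)) (i : Nat) : pvSpaces (l.take i) ≤ pvSpaces l := by
  unfold pvSpaces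
  rw [List.map_take]
  conv_rhs => rw [← List.take_append_drop i (l.map (fun l => l.count ' '))]
  rw [List.sum_append]
  omega

lemma take_succ_concat (l : List (List Char)) (i : Nat) (h : i < l.length) :
    l.take (i + 1) = l.take i ++ [l[i]] := by
  rw [List.take_add_one, List.getElem?_eq_getElem h]; rfl

lemma take_getLastD (l : List (List Char)) (i : Nat) (d : List Char) (h : i < l.length) :
    (l.take (i + 1)).getLastD d = l[i] := by
  rw [take_succ_concat l i h]
  exact List.getLastD_concat

lemma take_ne_nil (l : List (List Char)) (i : Nat) (hl : l ≠ []) (hi : 1 ≤ i) :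
    l.take i ≠ [] := by
  cases l with
  | nil => exact absurd rfl hl
  | cons h t =>
    cases i with
    | zero => omega
    | succ n => simp

lemma loop_inv (m : Nat)
    (HM : ∀ z : List (List Char), z ≠ [] → pvSpaces z < m → pvFA m z = pvFFC z)
    (l : List (List Char)) (hl : l ≠ []) (hfuel : pvSpaces l ≤ m) :
    ∀ k i r y, i + k = l.length → 1 ≤ i →
      y = (if r then pvFFC (l.take i) else l.take i) →
      (r = true → pvSpaces y < pvSpaces (l.take i)) →
      (r = false → pvFFC (l.take i) = l.take i) →
      pvFALoop m l i r y = pvFFC l := by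
  intro k
  induction k with
  | zero =>
    intro i r y hik h1 hy hr hfix
    have hi : ¬ i < l.length := by omega
    rw [pvFALoop, dif_neg hi]
    have htake : l.take i = l := List.take_of_length_le (by omega)
    cases r with
    | true => rw [hy, if_pos rfl, htake]
    | false => rw [hy, if_neg (by simp), htake, ← htake, hfix rfl, htake]
  | succ k ihk =>
    intro i r y hik h1 hy hr hfix
    have hi : i < l.length := by omega
    have hi1 : i - 1 < l.length := by omega
    rw [pvFALoop, dif_pos hi]
    have hprev : (PySem.List.pyGet? l ((i : Int) - 1)).getD [] = l[i - 1] := by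
      rw [show ((i : Int) - 1) = ((i - 1 : Nat) : Int) by omega, PySem.List.pyGet?_natCast,
        List.getElem?_eq_getElem hi1]
      rfl
    have hcur : (PySem.List.pyGet? l (i : Int)).getD [] = l[i] := by
      rw [PySem.List.pyGet?_natCast, List.getElem?_eq_getElem hi]
      rfl
    simp only [hprev, hcur, innerA_eq]
    -- (take i).getLastD [] is the previous original line
    have hlast : (l.take i).getLastD [] = l[i - 1] := by
      have h2 : i - 1 + 1 = i := by omega
      have := take_getLastD l (i - 1) [] hi1
      rw [h2] at this
      exact this
    have htne : l.take i ≠ [] := take_ne_nil l i hl h1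
    by_cases hb : (r || pvChgC l[i - 1] l[i]) = true
    · -- a change has happened at or before this iteration: recursion runs
      have hY : y = pvFFC (l.take i) := by
        cases r with
        | true => rw [hy, if_pos rfl]
        | false =>
          rw [hy, if_neg (by simp)]
          exact (hfix rfl).symm
      have hffne : pvFFC (l.take i) ≠ [] := by
        obtain ⟨a, t', he⟩ := List.exists_cons_of_ne_nil htne
        rw [he]
        simp [pvFFC]
      -- the strict space decrease that pays for the recursive call
      have hsp : pvSpaces (y ++ [pvFillC l[i - 1] l[i]]) < pvSpaces (l.take (i + 1)) := by
        rw [spaces_append, take_succ_concat l i hi, spaces_append]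
        cases r with
        | true =>
          have := hr rfl
          have := count_fillC_le l[i] l[i - 1]
          omega
        | false =>
          have hchg : pvChgC l[i - 1] l[i] = true := by simpa using hb
          have := count_fillC_lt l[i] l[i - 1] hchg
          have hyeq : pvSpaces y = pvSpaces (l.take i) := by
            rw [hy, if_neg (by simp)]
          omega
      have hspl : pvSpaces (y ++ [pvFillC l[i - 1] l[i]]) < m := by
        have := spaces_take_le l (i + 1)
        omega
      rw [if_pos hb]
      rw [HM (y ++ [pvFillC l[i - 1] l[i]]) (by simp) hspl]
      -- cascade: refilling the already-filled prefix plus the one-step-filled new line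
      -- is the forward fill of the whole (i+1)-prefix
      have hcasc : pvFFC (y ++ [pvFillC l[i - 1] l[i]]) = pvFFC (l.take (i + 1)) := by
        rw [hY, ffc_append (pvFFC (l.take i)) _ hffne, ffc_idem]
        have hmono : pvPipeLe l[i - 1] ((pvFFC (l.take i)).getLastD []) := by
          obtain ⟨a, t', he⟩ := List.exists_cons_of_ne_nil htne
          rw [← hlast, he]
          simp only [pvFFC, List.getLastD_cons]
          exact lastD_mono t' a a (pipeLe_refl a)
        rw [fillC_absorb l[i] l[i - 1] _ hmono]
        rw [take_succ_concat l i hi, ffc_append (l.take i) _ htne]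
      rw [hcasc, hb]
      -- next iteration's invariant, with recurse = true
      refine ihk (i + 1) true (pvFFC (l.take (i + 1))) (by omega) (by omega)
        (by rw [if_pos rfl]) (fun _ => ?_) (fun hco => by simp at hco)
      calc pvSpaces (pvFFC (l.take (i + 1)))
          ≤ pvSpaces (y ++ [pvFillC l[i - 1] l[i]]) := by
            rw [← hcasc]; exact spaces_ffc_le _
        _ < pvSpaces (l.take (i + 1)) := hsp
    · -- nothing changed yet: the new line is unchanged and the prefix stays a fixpoint
      have hr0 : r = false := by
        cases r with
        | true => simp at hb
        | false => rfl
      have hchg : pvChgC l[i - 1] l[i] = false := by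
        subst hr0; simpa using hb
      have hfill : pvFillC l[i - 1] l[i] = l[i] := fillC_of_chg_false l[i] l[i - 1] hchg
      subst hr0
      rw [if_neg hb]
      have hy' : y ++ [pvFillC l[i - 1] l[i]] = l.take (i + 1) := by
        rw [hfill, hy, if_neg (by simp), ← take_succ_concat l i hi]
      have hfix' : pvFFC (l.take (i + 1)) = l.take (i + 1) := by
        rw [take_succ_concat l i hi, ffc_append (l.take i) _ htne, hfix rfl, hlast, hfill]
      rw [hy', Bool.false_or, hchg]
      exact ihk (i + 1) false (l.take (i + 1)) (by omega) (by omega)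
        (by rw [if_neg (by simp)]) (fun hco => by simp at hco) (fun _ => hfix')

lemma main_eq : ∀ (m : Nat) (l : List (List Char)), l ≠ [] → pvSpaces l < m →
    pvFA m l = pvFFC l := by
  intro m
  induction m with
  | zero => intro l _ hsp; omega
  | succ m ihm =>
    intro l hl hsp
    obtain ⟨h, t, rfl⟩ := List.exists_cons_of_ne_nil hl
    rw [pvFA]
    have h0 : (PySem.List.pyGet? (h :: t) 0).getD [] = h := by
      rw [show (0 : Int) = ((0 : Nat) : Int) by norm_num, PySem.List.pyGet?_natCast]
      rfl
    rw [h0]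
    exact loop_inv m ihm (h :: t) hl (by omega) t.length 1 false [h]
      (by simp [Nat.add_comm]) le_rfl (by simp) (fun hco => by simp at hco)
      (fun _ => by simp [pvFFC, pvRestC])

-- ===== VERDICT (by name: the statement is the Claim_ definition above) =====
theorem f_spec : Claim_equal_f := by
  intro x _ hpre
  unfold Spec_f f f_alt
  match x with
  | [] => exact absurd rfl hpre.1
  | s :: xs =>
    have h := main_eq (pvSpaces ((s :: xs).map String.toList) + 1)
      ((s :: xs).map String.toList) (by simp) (by omega)
    simp only [List.map_cons] at h ⊢
    rw [h]
    simp only [pvFFC, List.map_cons, restEq]
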